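-- pv_equiv track=rewrite | github.com/ButteryCrumpet/terrariaWebScrape | utils.py | take_after
-- ===== SOURCE A (Python) =====
-- def take_after(_list, start, end=False):
--     output = []
--     take = False
--     for item in _list:
--         if end != False:
--             if item == end:
--                 return output
--
--         if take:
--             output.append(item)
--         elif item == start:
--             take = True
--     return output
-- ===== SOURCE B (Python) =====
-- def take_after(_list, start, end=False):
--     lst = list(_list)
--     t = lst.index(end) if end != False and end in lst else len(lst)
--     if start not in lst[:t]:
--         return []
--     s = lst.index(start)
--     return lst[s + 1:t]
-- ===== Notes on version B (the rewrite author's own statement) =====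
-- stated objective: simpler
-- what changed: Replaces the flag-driven accumulation loop with position lookups (index of end, membership of start before it) plus a single slice _list[s+1:t].
import Mathlib
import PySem

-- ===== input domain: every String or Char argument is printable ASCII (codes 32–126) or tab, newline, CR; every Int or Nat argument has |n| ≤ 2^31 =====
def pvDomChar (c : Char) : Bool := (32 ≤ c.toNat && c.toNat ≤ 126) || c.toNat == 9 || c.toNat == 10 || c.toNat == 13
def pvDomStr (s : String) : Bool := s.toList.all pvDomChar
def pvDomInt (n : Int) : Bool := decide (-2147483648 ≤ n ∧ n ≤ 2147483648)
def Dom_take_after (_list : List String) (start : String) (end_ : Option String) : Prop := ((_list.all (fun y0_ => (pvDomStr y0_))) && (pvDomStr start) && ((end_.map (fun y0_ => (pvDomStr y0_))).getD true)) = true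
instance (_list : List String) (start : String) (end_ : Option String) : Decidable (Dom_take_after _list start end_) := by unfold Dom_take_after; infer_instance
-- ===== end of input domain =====

-- B replaces A's flag-driven accumulation loop by position lookups plus one slice (objective: simpler).

-- ===== PORT A =====
-- the loop: state = (output, take); returns early when item == end (end != False)
def isEnd (end_ : Option String) (item : String) : Bool :=
  match end_ with | some e => item == e | none => false

def take_after_go (start : String) (end_ : Option String) :
    List String → List String → Bool → List String
  | [], output, _ => output
  | item :: rest, output, take =>
    if isEnd end_ item then output
    else if take then take_after_go start end_ rest (output ++ [item]) true
    else if item = start then take_after_go start end_ rest output true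
    else take_after_go start end_ rest output take

def take_after (_list : List String) (start : String) (end_ : Option String) : List String :=
  take_after_go start end_ _list [] false

-- ===== PORT B =====
def take_after_alt (_list : List String) (start : String) (end_ : Option String) : List String :=
  -- t = lst.index(end) if end != False and end in lst else len(lst)
  let t : Nat := match end_ with
    | some e => (PySem.List.index? _list e).getD _list.length
    | none => _list.length
  -- if start not in lst[:t]: return []
  if start ∈ PySem.List.slice _list none (some (t : Int)) then
    -- s = lst.index(start); return lst[s+1:t]
    match PySem.List.index? _list start with
    | some s => PySem.List.slice _list (some ((s : Int) + 1)) (some (t : Int))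
    | none => []
  else []

-- ===== PRECONDITION & SPEC =====
def Spec_take_after (_list : List String) (start : String) (end_ : Option String) (out : List String) : Prop := out = take_after_alt _list start end_
instance (_list : List String) (start : String) (end_ : Option String) (out : List String) : Decidable (Spec_take_after _list start end_ out) := by unfold Spec_take_after; infer_instance

-- ===== CLAIM (what is proved, stated in full; the proofs are below) =====
def Claim_equal_take_after : Prop := ∀ (_list : List String) (start : String) (end_ : Option String), Dom_take_after _list start end_ → Spec_take_after _list start end_ (take_after _list start end_)

-- ===== LEMMAS AND PROOFS =====

-- the "stop index" both programs are organised around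
def tIdx (end_ : Option String) (xs : List String) : Nat :=
  match end_ with
  | some e => (PySem.List.index? xs e).getD xs.length
  | none => xs.length

lemma tIdx_cons (end_ : Option String) (x : String) (xs : List String) :
    tIdx end_ (x :: xs) = if isEnd end_ x then 0 else tIdx end_ xs + 1 := by
  cases end_ with
  | none => simp [tIdx, isEnd]
  | some e =>
    by_cases h : x = e
    · subst h
      simp only [tIdx]
      rw [PySem.List.index?_cons_self]
      simp [isEnd]
    · simp only [tIdx]
      rw [PySem.List.index?_cons_of_ne xs h]
      have hE : isEnd (some e) x = false := by simp [isEnd, h]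
      rw [hE]
      cases PySem.List.index? xs e <;> simp

-- phase 2 of A (take = true): append everything up to the stop index
lemma go_true (start : String) (end_ : Option String) (xs : List String) (out : List String) :
    take_after_go start end_ xs out true = out ++ xs.take (tIdx end_ xs) := by
  induction xs generalizing out with
  | nil => simp [take_after_go, tIdx]
  | cons x xs ih =>
    rw [take_after_go, tIdx_cons]
    by_cases hx : isEnd end_ x = true
    · simp [hx]
    · simp only [hx, if_false, Bool.false_eq_true, if_true, List.take_succ_cons, ih]
      simp

-- B rewritten through tIdx: the branch on whether start occurs before the stop index
lemma alt_eq (xs : List String) (start : String) (end_ : Option String) :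
    take_after_alt xs start end_ =
      if start ∈ xs.take (tIdx end_ xs) then
        match PySem.List.index? xs start with
        | some s => (xs.drop (s + 1)).take (tIdx end_ xs - (s + 1))
        | none => []
      else [] := by
  show (if start ∈ PySem.List.slice xs none (some ((tIdx end_ xs : Nat) : Int)) then
      match PySem.List.index? xs start with
      | some s => PySem.List.slice xs (some ((s : Int) + 1)) (some ((tIdx end_ xs : Nat) : Int))
      | none => []
    else []) = _
  rw [PySem.List.slice_to_natCast xs (tIdx end_ xs)]
  by_cases hm : start ∈ xs.take (tIdx end_ xs)
  · rw [if_pos hm, if_pos hm]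
    cases hi : PySem.List.index? xs start with
    | none => rfl
    | some s =>
      show PySem.List.slice xs (some ((s : Int) + 1)) (some ((tIdx end_ xs : Nat) : Int))
          = (xs.drop (s + 1)).take (tIdx end_ xs - (s + 1))
      have hs : ((s : Int) + 1) = ((s + 1 : Nat) : Int) := by push_cast; ring
      rw [hs, PySem.List.slice_natCast xs (s + 1) (tIdx end_ xs)]
  · rw [if_neg hm, if_neg hm]

-- main induction: A's phase-1 scan agrees with B's lookup form
lemma main_eq (start : String) (end_ : Option String) (xs : List String) :
    take_after_go start end_ xs [] false = take_after_alt xs start end_ := by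
  induction xs with
  | nil => rw [alt_eq]; simp [take_after_go, tIdx]
  | cons x xs ih =>
    rw [alt_eq, take_after_go, tIdx_cons]
    by_cases hx : isEnd end_ x = true
    · simp [hx]
    · rw [if_neg hx, if_neg hx]
      simp only [Bool.false_eq_true, if_false, List.take_succ_cons]
      by_cases hs : x = start
      · subst hs
        rw [if_pos (by simp), if_pos (List.mem_cons_self ..)]
        rw [PySem.List.index?_cons_self]
        simp only [List.drop_succ_cons, List.drop_zero, Nat.add_sub_cancel]
        exact go_true x end_ xs []
      · rw [if_neg hs]
        rw [ih, alt_eq]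
        have hmem : (start ∈ x :: xs.take (tIdx end_ xs)) ↔ (start ∈ xs.take (tIdx end_ xs)) := by
          simp [Ne.symm hs]
        rw [PySem.List.index?_cons_of_ne xs hs]
        by_cases hm : start ∈ xs.take (tIdx end_ xs)
        · rw [if_pos hm, if_pos (hmem.mpr hm)]
          have hx_mem : start ∈ xs := List.mem_of_mem_take hm
          obtain ⟨s, hi⟩ := Option.isSome_iff_exists.mp ((PySem.List.index?_isSome_iff xs start).mpr hx_mem)
          rw [hi]
          simp only [Option.map_some, List.drop_succ_cons]
          congr 1
          omega
        · rw [if_neg hm, if_neg (fun h => hm (hmem.mp h))]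

-- ===== VERDICT (by name: the statement is the Claim_ definition above) =====
theorem take_after_spec : Claim_equal_take_after := by
  intro xs start end_ _
  unfold Spec_take_after take_after
  exact main_eq start end_ xs
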